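-- pv_equiv track=rewrite | github.com/Valdemal/CG4 | graphics/help_functions.py | cyclic_pare_iter
-- ===== SOURCE A (Python) =====
-- from typing import List, Iterable
--
-- def cyclic_pare_iter(container: Iterable):
--     it = iter(container)
--     try:
--         prev = first = next(it)
--         current = next(it)
--
--         while True:
--             try:
--                 yield prev, current
--                 prev = current
--                 current = next(it)
--
--             except StopIteration:
--                 yield current, first
--                 break
--
--     except StopIteration:
--         raise IndexError("Длина контейнера должна быть не менее 2!")
-- ===== SOURCE B (Python) =====
-- def cyclic_pare_iter(container):
--     lst = list(container)
--     n = len(lst)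
--     if n < 2:
--         raise IndexError("Длина контейнера должна быть не менее 2!")
--     for i in range(n):
--         yield lst[i], lst[(i + 1) % n]
-- ===== Notes on version B (the rewrite author's own statement) =====
-- stated objective: simpler
-- what changed: B materializes the container and yields (lst[i], lst[(i+1)%n]) by indexed modular traversal instead of A's streaming prev/current iterator with nested StopIteration handling.
import Mathlib
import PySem

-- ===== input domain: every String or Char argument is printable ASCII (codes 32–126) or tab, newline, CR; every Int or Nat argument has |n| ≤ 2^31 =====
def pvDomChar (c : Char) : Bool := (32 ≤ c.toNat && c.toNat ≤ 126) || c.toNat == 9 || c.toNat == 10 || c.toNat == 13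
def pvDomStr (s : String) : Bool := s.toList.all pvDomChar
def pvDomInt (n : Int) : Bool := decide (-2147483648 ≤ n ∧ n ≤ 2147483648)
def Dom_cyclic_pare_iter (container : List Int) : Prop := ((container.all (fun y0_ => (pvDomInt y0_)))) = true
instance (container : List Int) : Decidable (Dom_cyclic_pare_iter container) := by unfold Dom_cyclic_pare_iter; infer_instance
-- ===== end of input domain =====

-- B replaces A's streaming prev/current iterator and StopIteration handling with an
-- indexed modular traversal over the materialized list (objective: simpler).


-- ===== PORT A =====
-- A's while-loop: yield (prev, cur); then advance, and on exhaustion yield (cur, first).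
def pvLoopA (first prev cur : Int) : List Int → List (Int × Int)
  | [] => [(prev, cur), (cur, first)]
  | n :: rs => (prev, cur) :: pvLoopA first cur n rs

def cyclic_pare_iter (container : List Int) : List (Int × Int) :=
  match container with
  | f :: c :: rest => pvLoopA f f c rest
  | _ => []   -- fewer than 2 elements: A raises IndexError (excluded by Pre_)

-- ===== PORT B =====
def cyclic_pare_iter_alt (container : List Int) : List (Int × Int) :=
  let n := container.length
  (List.range n).map (fun i => ((container[i]?).getD 0, (container[(i + 1) % n]?).getD 0))

-- ===== PRECONDITION & SPEC =====
-- A raises IndexError ("Длина контейнера должна быть не менее 2!") when the container has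
-- fewer than 2 elements; B raises the same IndexError there, so Pre_ excludes exactly those.
def Pre_cyclic_pare_iter (container : List Int) : Prop := 2 ≤ container.length
instance (container : List Int) : Decidable (Pre_cyclic_pare_iter container) := by unfold Pre_cyclic_pare_iter; infer_instance
def pvWitness_cyclic_pare_iter : List Int := [1, 2, 3]

def Spec_cyclic_pare_iter (container : List Int) (out : List (Int × Int)) : Prop := out = cyclic_pare_iter_alt container
instance (container : List Int) (out : List (Int × Int)) : Decidable (Spec_cyclic_pare_iter container out) := by unfold Spec_cyclic_pare_iter; infer_instance

-- ===== CLAIM (what is proved, stated in full; the proofs are below) =====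
def Claim_equal_cyclic_pare_iter : Prop := ∀ (container : List Int), Dom_cyclic_pare_iter container → Pre_cyclic_pare_iter container → Spec_cyclic_pare_iter container (cyclic_pare_iter container)

-- ===== LEMMAS AND PROOFS =====

-- A's loop produces consecutive pairs of prev::cur::rest, cyclically closed with first.
theorem pvLoopA_eq_zip (rest : List Int) : ∀ (first prev cur : Int),
    pvLoopA first prev cur rest = List.zip (prev :: cur :: rest) ((cur :: rest) ++ [first]) := by
  induction rest with
  | nil => intro f p c; simp [pvLoopA, List.zip]
  | cons n rs ih =>
      intro f p c
      simp only [pvLoopA, ih f c n]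
      rfl

theorem cyclic_pare_iter_eq_zip (f c : Int) (rest : List Int) :
    cyclic_pare_iter (f :: c :: rest) =
      List.zip (f :: c :: rest) ((c :: rest) ++ [f]) := by
  simp [cyclic_pare_iter, pvLoopA_eq_zip]

-- ===== VERDICT (by name: the statement is the Claim_ definition above) =====
theorem cyclic_pare_iter_spec : Claim_equal_cyclic_pare_iter := by
  intro container _ hpre
  unfold Spec_cyclic_pare_iter
  match container, hpre with
  | f :: c :: rest, _ =>
    rw [cyclic_pare_iter_eq_zip]
    unfold cyclic_pare_iter_alt
    apply List.ext_getElem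
    · simp
    · intro i h1 h2
      set l : List Int := f :: c :: rest with hl
      have hlen : l.length = rest.length + 2 := by simp [hl]
      have hi : i < l.length := by
        simp only [List.length_zip, List.length_append, List.length_cons] at h1
        omega
      have hzl : (List.zip l ((c :: rest) ++ [f])).length = l.length := by
        simp [hl]
      simp only [List.getElem_map, List.getElem_range]
      rw [List.getElem_zip]
      have hib : i < ((c :: rest) ++ [f]).length := by
        simp only [List.length_append, List.length_cons, List.length_nil, hlen] at hi ⊢
        omega
      have hfst : l[i]?.getD 0 = l[i] := by
        rw [List.getElem?_eq_getElem hi]; rfl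
      refine Prod.ext ?_ ?_
      · simpa using hfst.symm ▸ rfl
      · -- second components
        show ((c :: rest) ++ [f])[i] = l[(i + 1) % l.length]?.getD 0
        by_cases hlast : i + 1 = l.length
        · have hmod : (i + 1) % l.length = 0 := by rw [hlast]; simp
          have : ((c :: rest) ++ [f])[i] = f := by
            have : i = (c :: rest).length := by simp at hlast ⊢; omega
            simp [this]
          rw [this, hmod]
          simp [hl]
        · have hlt : i + 1 < l.length := by omega
          have hmod : (i + 1) % l.length = i + 1 := Nat.mod_eq_of_lt hlt
          have h2' : i < (c :: rest).length := by simp at hlt ⊢; omega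
          have : ((c :: rest) ++ [f])[i] = (c :: rest)[i] := by
            rw [List.getElem_append_left h2']
          rw [this, hmod, List.getElem?_eq_getElem hlt]
          show (c :: rest)[i] = l[i + 1]
          simp [hl]
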